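-- pv_equiv track=rewrite | github.com/bb1950328/DigiCod_Nspire | icth_tool.py | is_densely_packed
-- ===== SOURCE A (Python) =====
-- def binomial(n, k):
--     """Binomialkoeffizient ohne math.comb für MicroPython"""
--     if k < 0 or k > n:
--         return 0
--     if k == 0 or k == n:
--         return 1
--
--     # Berechne n! / (k! * (n-k)!)
--     return factorial(n) // (factorial(k) * factorial(n - k))
--
-- def is_densely_packed(n, k, d):
--     """
--     Prüft, ob ein Blockcode dichtgepackt ist
--     """
--     # Berechne die Anzahl der Codewörter (2^k)
--     num_codewords = 2 ** k
--
--     # Anzahl der Bits, die korrigiert werden können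
--     t = (d - 1) // 2
--
--     # Berechne die Anzahl der Wörter innerhalb der Korrekturkugel
--     sphere_size = 0
--     for i in range(t + 1):
--         # Anzahl der möglichen Positionen für i Fehler
--         sphere_size += binomial(n, i)
--
--     # Ein Code ist dichtgepackt, wenn:
--     total_words = 2 ** n
--     packed_size = num_codewords * sphere_size
--
--     return total_words == packed_size
--
-- def factorial(n):
--     """
--     Berechnet die Fakultät n!
--
--     Args:
--         n (int): Nicht-negative Ganzzahl
--
--     Returns:
--         int: n!
--     """
--     if n < 0:
--         raise ValueError("Fakultät nicht für negative Zahlen definiert")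
--
--     result = 1
--     for i in range(2, n + 1):
--         result *= i
--
--     return result
-- ===== SOURCE B (Python) =====
-- def is_densely_packed(n, k, d):
--     # Incremental binomial: C(n,i) = C(n,i-1)*(n-i+1)//i ; sphere accumulated in one pass.
--     t = (d - 1) // 2
--     sphere_size = 0
--     c = 1
--     for i in range(t + 1):
--         if i > 0:
--             c = c * (n - i + 1) // i
--         sphere_size += c
--     return (1 << n) == (sphere_size << k)
-- ===== Notes on version B (the rewrite author's own statement) =====
-- stated objective: faster
-- what changed: Replaces per-term factorial-based binomials (three factorial loops per term) with one incremental binomial recurrence C(n,i)=C(n,i-1)*(n-i+1)//i accumulated in a single pass, and replaces 2**n/2**k by bit shifts.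
-- outside the precondition, e.g. on is_densely_packed(-3, 0, 3): A returns False, B raises ValueError; on is_densely_packed(5, -1, 3): A returns False, B raises ValueError
import Mathlib
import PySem

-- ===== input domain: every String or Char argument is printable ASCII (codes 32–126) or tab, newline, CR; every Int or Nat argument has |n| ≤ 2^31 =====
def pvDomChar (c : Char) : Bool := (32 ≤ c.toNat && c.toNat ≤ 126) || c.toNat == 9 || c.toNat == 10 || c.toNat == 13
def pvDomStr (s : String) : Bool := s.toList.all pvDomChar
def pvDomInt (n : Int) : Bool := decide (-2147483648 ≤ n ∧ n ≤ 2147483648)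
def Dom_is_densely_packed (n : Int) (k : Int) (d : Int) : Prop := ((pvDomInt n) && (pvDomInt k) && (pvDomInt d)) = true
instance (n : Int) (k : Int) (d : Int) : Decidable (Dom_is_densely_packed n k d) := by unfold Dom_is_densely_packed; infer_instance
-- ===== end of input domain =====

-- B replaces A's per-term factorial-based binomials with one incremental binomial
-- recurrence accumulated in a single pass (objective: faster).


-- ===== PORT A =====
-- factorial: result = 1; for i in range(2, n+1): result *= i  (A never calls it with n < 0 here)
def pyFactorial (n : Int) : Int :=
  (PySem.List.pyRange 2 (n + 1) 1).foldl (fun result i => result * i) 1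

-- binomial(n, k), guards in A's order
def pyBinomial (n : Int) (k : Int) : Int :=
  if k < 0 ∨ k > n then 0
  else if k = 0 ∨ k = n then 1
  else PySem.Int.floordiv (pyFactorial n) (pyFactorial k * pyFactorial (n - k))

-- 2 ** k / 2 ** n are integer powers inside Pre_ (n, k ≥ 0); .toNat is exact there
def is_densely_packed (n : Int) (k : Int) (d : Int) : Bool :=
  let num_codewords : Int := 2 ^ k.toNat
  let t := PySem.Int.floordiv (d - 1) 2
  let sphere_size := (PySem.List.pyRange 0 (t + 1) 1).foldl (fun acc i => acc + pyBinomial n i) 0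
  let total_words : Int := 2 ^ n.toNat
  decide (total_words = num_codewords * sphere_size)

-- ===== PORT B =====
-- single pass: state (sphere_size, c) with c the running binomial C(n, i); shifts for the powers of two
def is_densely_packed_alt (n : Int) (k : Int) (d : Int) : Bool :=
  let t := PySem.Int.floordiv (d - 1) 2
  let p := (PySem.List.pyRange 0 (t + 1) 1).foldl
    (fun (p : Int × Int) i =>
      let c := if 0 < i then PySem.Int.floordiv (p.2 * (n - i + 1)) i else p.2
      (p.1 + c, c)) (0, 1)
  decide ((1 : Int) <<< n.toNat = p.1 <<< k.toNat)

-- ===== PRECONDITION & SPEC =====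
-- Pre_ restricts to the natural domain of a block code: n, k ≥ 0. Outside it Python's
-- 2**n / 2**k are floats (A compares against a float there; B's shift raises ValueError).
def Pre_is_densely_packed (n : Int) (k : Int) (d : Int) : Prop := 0 ≤ n ∧ 0 ≤ k
instance (n : Int) (k : Int) (d : Int) : Decidable (Pre_is_densely_packed n k d) := by unfold Pre_is_densely_packed; infer_instance
def pvWitness_is_densely_packed : Int × Int × Int := (3, 1, 3)

def Spec_is_densely_packed (n : Int) (k : Int) (d : Int) (out : Bool) : Prop := out = is_densely_packed_alt n k d
instance (n : Int) (k : Int) (d : Int) (out : Bool) : Decidable (Spec_is_densely_packed n k d out) := by unfold Spec_is_densely_packed; infer_instance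

-- ===== CLAIM (what is proved, stated in full; the proofs are below) =====
def Claim_equal_is_densely_packed : Prop := ∀ (n : Int) (k : Int) (d : Int), Dom_is_densely_packed n k d → Pre_is_densely_packed n k d → Spec_is_densely_packed n k d (is_densely_packed n k d)

-- ===== LEMMAS AND PROOFS =====

-- pyFactorial at a natural argument is the factorial
lemma pyFactorial_natCast (m : Nat) : pyFactorial (m : Int) = (Nat.factorial m : Int) := by
  induction m with
  | zero => decide
  | succ j ih =>
    cases j with
    | zero => decide
    | succ j' =>
      unfold pyFactorial at *
      rw [show ((j' + 1 + 1 : Nat) : Int) + 1 = ((j' + 1 : Nat) : Int) + 1 + 1 by push_cast; ring,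
        PySem.List.pyRange_one_succ_right (by push_cast; omega), List.foldl_append, ih]
      simp [Nat.factorial_succ]
      ring

lemma floordiv_mul_cancel (a b : Int) (h : 0 < b) : PySem.Int.floordiv (a * b) b = a := by
  rw [PySem.Int.floordiv_eq_ediv_of_pos h]
  exact Int.mul_ediv_cancel a (by omega)

-- pyBinomial at natural arguments is Nat.choose
lemma pyBinomial_natCast (nn j : Nat) : pyBinomial (nn : Int) (j : Int) = (Nat.choose nn j : Int) := by
  unfold pyBinomial
  by_cases h : nn < j
  · rw [if_pos (Or.inr (by exact_mod_cast h))]; simp [Nat.choose_eq_zero_of_lt h]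
  · have h : j ≤ nn := by omega
    rw [if_neg (by push Not; exact ⟨Int.natCast_nonneg j, by exact_mod_cast h⟩)]
    by_cases h0 : j = 0
    · subst h0; simp
    by_cases hn : j = nn
    · subst hn; simp
    rw [if_neg (by push Not; exact ⟨by exact_mod_cast h0, by exact_mod_cast hn⟩)]
    rw [show (nn : Int) - (j : Int) = ((nn - j : Nat) : Int) by omega]
    rw [pyFactorial_natCast, pyFactorial_natCast, pyFactorial_natCast]
    have key : (Nat.factorial nn : Int)
        = (Nat.choose nn j : Int) * ((Nat.factorial j : Int) * (Nat.factorial (nn - j) : Int)) := by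
      rw [show (Nat.choose nn j : Int) * ((Nat.factorial j : Int) * (Nat.factorial (nn - j) : Int))
          = ((Nat.choose nn j * Nat.factorial j * Nat.factorial (nn - j) : Nat) : Int) by push_cast; ring,
        Nat.choose_mul_factorial_mul_factorial h]
    rw [key, floordiv_mul_cancel _ _ (by positivity)]

-- the incremental recurrence: C(n, j-1) * (n - j + 1) = C(n, j) * j for j ≥ 1 (all cases, incl. j > n)
lemma choose_step (nn j : Nat) (hj : 0 < j) :
    (Nat.choose nn (j - 1) : Int) * ((nn : Int) - (j : Int) + 1) = (Nat.choose nn j : Int) * (j : Int) := by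
  obtain ⟨j', rfl⟩ : ∃ j', j = j' + 1 := ⟨j - 1, by omega⟩
  simp only [Nat.add_sub_cancel]
  by_cases h : j' + 1 ≤ nn
  · have hrec := Nat.choose_succ_right_eq nn j'
    have hcast : ((nn - j' : Nat) : Int) = (nn : Int) - (j' : Nat) := by omega
    calc (Nat.choose nn j' : Int) * ((nn : Int) - ((j' + 1 : Nat) : Int) + 1)
        = ((Nat.choose nn j' * (nn - j') : Nat) : Int) := by push_cast [hcast]; ring
      _ = ((Nat.choose nn (j' + 1) * (j' + 1) : Nat) : Int) := by rw [hrec]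
      _ = _ := by push_cast; ring
  · have h : nn < j' + 1 := by omega
    rw [Nat.choose_eq_zero_of_lt h]
    by_cases h2 : nn < j'
    · rw [Nat.choose_eq_zero_of_lt h2]; simp
    · have : j' = nn := by omega
      subst this
      rw [Nat.choose_self]; push_cast; ring

-- A's loop computes the sphere sum
lemma foldA_eq (nn : Nat) (j : Nat) :
    (PySem.List.pyRange 0 ((j : Nat) : Int) 1).foldl (fun acc i => acc + pyBinomial (nn : Int) i) 0
      = ∑ i ∈ Finset.range j, (Nat.choose nn i : Int) := by
  induction j with
  | zero => simp [PySem.List.pyRange_one_eq_nil]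
  | succ m ih =>
    rw [show ((m + 1 : Nat) : Int) = ((m : Nat) : Int) + 1 by push_cast; ring,
      PySem.List.pyRange_one_succ_right (Int.natCast_nonneg m), List.foldl_append, ih]
    simp only [List.foldl]
    rw [pyBinomial_natCast, Finset.sum_range_succ]

-- B's loop keeps (partial sum, current binomial)
lemma foldB_eq (nn : Nat) (j : Nat) :
    (PySem.List.pyRange 0 ((j : Nat) : Int) 1).foldl
      (fun (p : Int × Int) i =>
        let c := if 0 < i then PySem.Int.floordiv (p.2 * ((nn : Int) - i + 1)) i else p.2
        (p.1 + c, c)) (0, 1)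
      = (∑ i ∈ Finset.range j, (Nat.choose nn i : Int), (Nat.choose nn (j - 1) : Int)) := by
  induction j with
  | zero => simp [PySem.List.pyRange_one_eq_nil]
  | succ m ih =>
    rw [show ((m + 1 : Nat) : Int) = ((m : Nat) : Int) + 1 by push_cast; ring,
      PySem.List.pyRange_one_succ_right (Int.natCast_nonneg m), List.foldl_append, ih]
    simp only [List.foldl, Nat.add_sub_cancel]
    by_cases hm : 0 < m
    · rw [if_pos (by exact_mod_cast hm), choose_step nn m hm,
        floordiv_mul_cancel _ _ (by exact_mod_cast hm), Finset.sum_range_succ]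
    · have : m = 0 := by omega
      subst this
      norm_num

-- ===== VERDICT (by name: the statement is the Claim_ definition above) =====
theorem is_densely_packed_spec : Claim_equal_is_densely_packed := by
  intro n k d _ hpre
  obtain ⟨hn, hk⟩ := hpre
  obtain ⟨nn, rfl⟩ : ∃ nn : Nat, n = (nn : Int) := ⟨n.toNat, by omega⟩
  unfold Spec_is_densely_packed is_densely_packed is_densely_packed_alt
  have hr : PySem.List.pyRange 0 (PySem.Int.floordiv (d - 1) 2 + 1) 1
      = PySem.List.pyRange 0 (((PySem.Int.floordiv (d - 1) 2 + 1).toNat : Nat) : Int) 1 := by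
    by_cases h : PySem.Int.floordiv (d - 1) 2 + 1 ≤ 0
    · rw [PySem.List.pyRange_one_eq_nil h, PySem.List.pyRange_one_eq_nil (by omega)]
    · congr 1; omega
  dsimp only
  rw [hr, foldA_eq nn, foldB_eq nn]
  simp only [Int.shiftLeft_eq, one_mul, Int.toNat_natCast]
  rw [mul_comm ((2 : Int) ^ k.toNat)]
  rfl
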